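-- pv_equiv track=rewrite | github.com/chplay2020/pdf-tool-evaluation | src/scripts/clean_and_rechunk.py | _page_at
-- ===== SOURCE A (Python) =====
-- def _page_at(char_pos: int, page_markers: list[tuple[int, int]]) -> int:
--     """Get page number at character position."""
--     page = 1
--     for mpos, pnum in page_markers:
--         if mpos <= char_pos:
--             if pnum > 0:
--                 page = pnum
--         else:
--             break
--     return page
-- ===== SOURCE B (Python) =====
-- def _page_at(char_pos: int, page_markers: list[tuple[int, int]]) -> int:
--     """Get page number at character position."""
--     boundary = len(page_markers)
--     for i, (mpos, _pnum) in enumerate(page_markers):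
--         if mpos > char_pos:
--             boundary = i
--             break
--     for _mpos, pnum in reversed(page_markers[:boundary]):
--         if pnum > 0:
--             return pnum
--     return 1
-- ===== Notes on version B (the rewrite author's own statement) =====
-- stated objective: alternative
-- what changed: Instead of a single forward pass maintaining a running page variable, B first computes the cut boundary (index of the first marker exceeding char_pos) and then scans the prefix backward, returning the first positive page number found, defaulting to 1.
import Mathlib
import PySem

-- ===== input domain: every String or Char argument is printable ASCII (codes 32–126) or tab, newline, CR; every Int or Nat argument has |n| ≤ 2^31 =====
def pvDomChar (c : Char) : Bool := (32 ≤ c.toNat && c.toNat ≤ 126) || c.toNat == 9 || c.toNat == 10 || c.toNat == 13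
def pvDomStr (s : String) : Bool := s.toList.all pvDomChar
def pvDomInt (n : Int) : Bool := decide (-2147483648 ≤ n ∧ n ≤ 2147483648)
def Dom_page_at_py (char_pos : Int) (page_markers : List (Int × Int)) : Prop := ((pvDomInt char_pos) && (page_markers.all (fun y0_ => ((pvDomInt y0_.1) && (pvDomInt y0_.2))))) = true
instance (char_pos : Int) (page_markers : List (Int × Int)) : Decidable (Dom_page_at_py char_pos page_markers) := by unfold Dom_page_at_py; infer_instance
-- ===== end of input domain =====

-- B replaces A's single forward pass with a running page variable by a two-phase scheme:
-- compute the cut boundary (prefix before the first marker with mpos > char_pos), then scan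
-- that prefix backward for the first positive page number, defaulting to 1.

-- ===== PORT A =====
-- the for-loop of A with its running `page` accumulator and the `break` on mpos > char_pos
def pageAtGo (char_pos : Int) (page : Int) : List (Int × Int) → Int
  | [] => page
  | (mpos, pnum) :: rest =>
    if mpos ≤ char_pos then
      pageAtGo char_pos (if pnum > 0 then pnum else page) rest
    else page

def page_at_py (char_pos : Int) (page_markers : List (Int × Int)) : Int :=
  pageAtGo char_pos 1 page_markers

-- ===== PORT B =====
-- B's first loop: page_markers[:boundary], boundary = index of first marker with mpos > char_pos
def pagePrefix (char_pos : Int) : List (Int × Int) → List (Int × Int)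
  | [] => []
  | (mpos, pnum) :: rest =>
    if mpos > char_pos then [] else (mpos, pnum) :: pagePrefix char_pos rest

-- B's second loop: first positive pnum in the reversed prefix, else 1
def page_at_py_alt (char_pos : Int) (page_markers : List (Int × Int)) : Int :=
  match (pagePrefix char_pos page_markers).reverse.find? (fun p => decide (p.2 > 0)) with
  | some p => p.2
  | none => 1

-- ===== PRECONDITION & SPEC =====
def Spec_page_at_py (char_pos : Int) (page_markers : List (Int × Int)) (out : Int) : Prop := out = page_at_py_alt char_pos page_markers
instance (char_pos : Int) (page_markers : List (Int × Int)) (out : Int) : Decidable (Spec_page_at_py char_pos page_markers out) := by unfold Spec_page_at_py; infer_instance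

-- ===== CLAIM (what is proved, stated in full; the proofs are below) =====
def Claim_equal_page_at_py : Prop := ∀ (char_pos : Int) (page_markers : List (Int × Int)), Dom_page_at_py char_pos page_markers → Spec_page_at_py char_pos page_markers (page_at_py char_pos page_markers)

-- ===== LEMMAS AND PROOFS =====

-- A's loop equals: last positive pnum in the prefix if any, else the accumulator
theorem pageAtGo_eq (char_pos : Int) (l : List (Int × Int)) : ∀ (page : Int),
    pageAtGo char_pos page l =
      match (pagePrefix char_pos l).reverse.find? (fun p => decide (p.2 > 0)) with
      | some p => p.2
      | none => page := by
  induction l with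
  | nil => intro page; simp [pageAtGo, pagePrefix]
  | cons hd tl ih =>
    intro page
    obtain ⟨mpos, pnum⟩ := hd
    by_cases hm : mpos ≤ char_pos
    · have hng : ¬ mpos > char_pos := by omega
      rw [pageAtGo, pagePrefix]
      simp only [hm, if_pos, hng, if_neg, not_false_iff, List.reverse_cons,
        List.find?_append]
      rw [ih]
      cases hf : (pagePrefix char_pos tl).reverse.find? (fun p => decide (p.2 > 0)) with
      | some p => simp
      | none =>
        simp only [Option.none_or]
        by_cases hp : pnum > 0 <;> simp [List.find?, hp]
    · have hg : mpos > char_pos := by omega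
      rw [pageAtGo, pagePrefix]
      simp [hm, hg]

-- ===== VERDICT (by name: the statement is the Claim_ definition above) =====
theorem page_at_py_spec : Claim_equal_page_at_py := by
  intro char_pos page_markers _
  unfold Spec_page_at_py page_at_py page_at_py_alt
  exact pageAtGo_eq char_pos page_markers 1
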